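-- pv_equiv track=rewrite | github.com/Ben-Edwards44/Advent-Of-Code | 2025/day8.py | add_to_circuit
-- ===== SOURCE A (Python) =====
-- def add_to_circuit(circuits, a, b):
--     joined = []
--     to_rem = []
--     for i, x in enumerate(circuits):
--         if a in x:
--             joined += x
--             to_rem.append(i)
--         elif b in x:
--             joined += x
--             to_rem.append(i)
--
--     new_circuits = [x for i, x in enumerate(circuits) if i not in to_rem]
--     new_circuits.append(joined)
--
--     return new_circuits
-- ===== SOURCE B (Python) =====
-- def add_to_circuit(circuits, a, b):
--     joined = []
--     new_circuits = []
--     for x in circuits: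
--         if a in x or b in x:
--             joined += x
--         else:
--             new_circuits.append(x)
--     new_circuits.append(joined)
--     return new_circuits
-- ===== Notes on version B (the rewrite author's own statement) =====
-- stated objective: simpler
-- what changed: Single partition pass keeping the surviving circuits directly, eliminating A's to_rem index list and its second index-filtering comprehension.
import Mathlib
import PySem

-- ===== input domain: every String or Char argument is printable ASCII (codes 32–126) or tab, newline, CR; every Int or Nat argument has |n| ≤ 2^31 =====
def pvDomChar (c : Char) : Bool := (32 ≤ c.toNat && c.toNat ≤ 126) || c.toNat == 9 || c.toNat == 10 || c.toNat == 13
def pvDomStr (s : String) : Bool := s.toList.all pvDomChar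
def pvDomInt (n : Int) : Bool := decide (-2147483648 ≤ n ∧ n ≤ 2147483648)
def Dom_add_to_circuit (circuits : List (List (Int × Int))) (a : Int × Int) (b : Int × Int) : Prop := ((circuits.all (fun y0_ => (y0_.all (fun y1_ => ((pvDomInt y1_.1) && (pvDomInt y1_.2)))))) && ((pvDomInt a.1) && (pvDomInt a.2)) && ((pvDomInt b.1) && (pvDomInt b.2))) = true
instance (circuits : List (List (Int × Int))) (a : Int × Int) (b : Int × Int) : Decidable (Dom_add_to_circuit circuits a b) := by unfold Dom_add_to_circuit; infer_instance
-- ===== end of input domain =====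

-- B replaces A's to_rem index list and second index-filtering comprehension by one
-- partition pass that keeps the surviving circuits directly (objective: simpler).

-- ===== PORT A =====
def add_to_circuit (circuits : List (List (Int × Int))) (a : Int × Int) (b : Int × Int) : List (List (Int × Int)) :=
  -- joined = []; to_rem = []; for i, x in enumerate(circuits): …
  let st := (PySem.List.enumerate circuits).foldl
    (fun (s : List (Int × Int) × List Int) (p : Int × List (Int × Int)) =>
      if a ∈ p.2 then (s.1 ++ p.2, s.2 ++ [p.1])
      else if b ∈ p.2 then (s.1 ++ p.2, s.2 ++ [p.1])
      else s)
    ([], [])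
  -- new_circuits = [x for i, x in enumerate(circuits) if i not in to_rem]
  let new_circuits := ((PySem.List.enumerate circuits).filter (fun p => decide (p.1 ∉ st.2))).map (·.2)
  new_circuits ++ [st.1]

-- ===== PORT B =====
def add_to_circuit_alt (circuits : List (List (Int × Int))) (a : Int × Int) (b : Int × Int) : List (List (Int × Int)) :=
  -- joined = []; new_circuits = []; one pass: join matching circuits, keep the rest
  let st := circuits.foldl
    (fun (s : List (Int × Int) × List (List (Int × Int))) (x : List (Int × Int)) =>
      if a ∈ x ∨ b ∈ x then (s.1 ++ x, s.2) else (s.1, s.2 ++ [x]))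
    ([], [])
  st.2 ++ [st.1]

-- ===== PRECONDITION & SPEC =====
def Spec_add_to_circuit (circuits : List (List (Int × Int))) (a : Int × Int) (b : Int × Int) (out : List (List (Int × Int))) : Prop := out = add_to_circuit_alt circuits a b
instance (circuits : List (List (Int × Int))) (a : Int × Int) (b : Int × Int) (out : List (List (Int × Int))) : Decidable (Spec_add_to_circuit circuits a b out) := by unfold Spec_add_to_circuit; infer_instance

-- ===== CLAIM (what is proved, stated in full; the proofs are below) =====
def Claim_equal_add_to_circuit : Prop := ∀ (circuits : List (List (Int × Int))) (a : Int × Int) (b : Int × Int), Dom_add_to_circuit circuits a b → Spec_add_to_circuit circuits a b (add_to_circuit circuits a b)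

-- ===== LEMMAS AND PROOFS =====

-- the matching predicate both programs branch on
def pvHit (a b : Int × Int) (x : List (Int × Int)) : Bool := decide (a ∈ x) || decide (b ∈ x)

-- B's fold accumulates the flattened hits and the kept circuits
theorem foldB_eq (a b : Int × Int) :
    ∀ (cs : List (List (Int × Int))) (j : List (Int × Int)) (n : List (List (Int × Int))),
    cs.foldl
      (fun (s : List (Int × Int) × List (List (Int × Int))) (x : List (Int × Int)) =>
        if a ∈ x ∨ b ∈ x then (s.1 ++ x, s.2) else (s.1, s.2 ++ [x]))
      (j, n)
    = (j ++ (cs.filter (pvHit a b)).flatten, n ++ cs.filter (fun x => !pvHit a b x)) := by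
  intro cs
  induction cs with
  | nil => intro j n; simp
  | cons x xs ih =>
    intro j n
    by_cases hx : a ∈ x ∨ b ∈ x
    · have hp : pvHit a b x = true := by simp [pvHit]; tauto
      simp [List.foldl, hx, ih, hp]
    · have hp : pvHit a b x = false := by simp [pvHit]; tauto
      simp [List.foldl, hx, ih, hp]

-- A's fold accumulates the flattened hits and the indices of the hits
theorem foldA_eq (a b : Int × Int) :
    ∀ (cs : List (List (Int × Int))) (s : Int) (j : List (Int × Int)) (r : List Int),
    (PySem.List.enumerate cs s).foldl
      (fun (st : List (Int × Int) × List Int) (p : Int × List (Int × Int)) =>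
        if a ∈ p.2 then (st.1 ++ p.2, st.2 ++ [p.1])
        else if b ∈ p.2 then (st.1 ++ p.2, st.2 ++ [p.1])
        else st)
      (j, r)
    = (j ++ (cs.filter (pvHit a b)).flatten,
       r ++ ((PySem.List.enumerate cs s).filter (fun q => pvHit a b q.2)).map (·.1)) := by
  intro cs
  induction cs with
  | nil => intro s j r; simp [PySem.List.enumerate_nil]
  | cons x xs ih =>
    intro s j r
    rw [PySem.List.enumerate_cons]
    by_cases ha : a ∈ x
    · have hp : pvHit a b x = true := by simp [pvHit, ha]
      simp [List.foldl, ha, ih, hp]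
    · by_cases hb : b ∈ x
      · have hp : pvHit a b x = true := by simp [pvHit, hb]
        simp [List.foldl, ha, hb, ih, hp]
      · have hp : pvHit a b x = false := by simp [pvHit, ha, hb]
        simp [List.foldl, ha, hb, ih, hp]

-- membership of an enumerate index in the hit-index list is the hit test itself
theorem mem_hit_indices (a b : Int × Int) (cs : List (List (Int × Int))) (s : Int)
    (q : Int × List (Int × Int)) (hq : q ∈ PySem.List.enumerate cs s) :
    (q.1 ∈ ((PySem.List.enumerate cs s).filter (fun q => pvHit a b q.2)).map (·.1))
      ↔ pvHit a b q.2 = true := by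
  constructor
  · intro h
    rcases List.mem_map.1 h with ⟨q', hq', hfst⟩
    rcases List.mem_filter.1 hq' with ⟨hq'mem, hq'hit⟩
    rcases (PySem.List.mem_enumerate_iff _ _ _).1 hq with ⟨k, hk, rfl⟩
    rcases (PySem.List.mem_enumerate_iff _ _ _).1 hq'mem with ⟨k', hk', rfl⟩
    simp only at hfst
    have : k' = k := by omega
    subst this
    exact hq'hit
  · intro h
    exact List.mem_map.2 ⟨q, List.mem_filter.2 ⟨hq, h⟩, rfl⟩

-- projecting the kept pairs of enumerate back to the circuits
theorem map_snd_filter_enumerate (a b : Int × Int) :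
    ∀ (cs : List (List (Int × Int))) (s : Int),
    ((PySem.List.enumerate cs s).filter (fun q => !pvHit a b q.2)).map (·.2)
      = cs.filter (fun x => !pvHit a b x) := by
  intro cs
  induction cs with
  | nil => intro s; simp [PySem.List.enumerate_nil]
  | cons x xs ih =>
    intro s
    rw [PySem.List.enumerate_cons]
    by_cases hp : pvHit a b x = true
    · simp [hp, ih]
    · simp [hp, ih]

-- ===== VERDICT (by name: the statement is the Claim_ definition above) =====
theorem add_to_circuit_spec : Claim_equal_add_to_circuit := by
  intro circuits a b _
  unfold Spec_add_to_circuit add_to_circuit add_to_circuit_alt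
  rw [foldA_eq, foldB_eq]
  simp only [List.nil_append]
  congr 1
  rw [← map_snd_filter_enumerate a b circuits 0]
  congr 1
  apply List.filter_congr
  intro q hq
  have hiff := mem_hit_indices a b circuits 0 q hq
  simp [hiff]
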